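-- pv_equiv track=rewrite | github.com/ciunowicz/kropki | Grid.py | getcordDP
-- ===== SOURCE A (Python) =====
-- a = 1
--
-- b = 2
--
-- def getcordDP(matrix, a, b):
--         point = []
--         for i in range(len(matrix)):
--             for j in range(len(matrix[i])):
--                 if i == a and j == b:
--                     point.extend(matrix[i][j])
--                     break
--                 if point:
--                     break
--         return point
-- ===== SOURCE B (Python) =====
-- def getcordDP(matrix, a, b):
--     if 0 <= a < len(matrix) and 0 <= b < len(matrix[a]):
--         return list(matrix[a][b])
--     return []
-- ===== Notes on version B (the rewrite author's own statement) =====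
-- stated objective: simpler
-- what changed: Replaces the nested index scan with break-simulation by a single bounds check and direct indexing matrix[a][b].
import Mathlib
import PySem

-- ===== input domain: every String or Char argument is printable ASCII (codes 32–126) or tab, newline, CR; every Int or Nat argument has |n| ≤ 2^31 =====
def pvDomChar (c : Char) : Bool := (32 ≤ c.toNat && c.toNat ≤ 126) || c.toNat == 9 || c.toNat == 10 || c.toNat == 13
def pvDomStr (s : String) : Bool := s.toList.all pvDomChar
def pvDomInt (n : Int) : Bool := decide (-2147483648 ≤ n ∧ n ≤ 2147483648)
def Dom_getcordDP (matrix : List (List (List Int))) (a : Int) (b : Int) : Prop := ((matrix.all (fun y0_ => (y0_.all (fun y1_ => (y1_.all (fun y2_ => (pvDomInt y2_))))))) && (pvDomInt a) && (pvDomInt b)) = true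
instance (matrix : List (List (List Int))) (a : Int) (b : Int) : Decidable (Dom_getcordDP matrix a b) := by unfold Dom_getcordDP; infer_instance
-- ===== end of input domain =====

-- B replaces A's full nested scan (with break simulation) by one bounds check and direct indexing; objective: simpler.

-- ===== PORT A =====
-- inner 'for j in range(len(matrix[i]))' loop; returning = the loop ended or broke
def pvInnerA (row : List (List Int)) (i a b : Int) (js : List Int) (point : List Int) : List Int :=
  match js with
  | [] => point
  | j :: rest =>
    if i = a ∧ j = b then point ++ PySem.List.pyGetD row j []          -- point.extend(matrix[i][j]); break
    else if point ≠ [] then point                                       -- if point: break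
    else pvInnerA row i a b rest point

-- outer 'for i in range(len(matrix))' loop
def pvOuterA (matrix : List (List (List Int))) (a b : Int) (is : List Int) (point : List Int) : List Int :=
  match is with
  | [] => point
  | i :: rest =>
    pvOuterA matrix a b rest
      (pvInnerA (PySem.List.pyGetD matrix i []) i a b
        (PySem.List.pyRange 0 ((PySem.List.pyGetD matrix i []).length : Int) 1) point)

def getcordDP (matrix : List (List (List Int))) (a : Int) (b : Int) : List Int :=
  pvOuterA matrix a b (PySem.List.pyRange 0 (matrix.length : Int) 1) []

-- ===== PORT B =====
def getcordDP_alt (matrix : List (List (List Int))) (a : Int) (b : Int) : List Int :=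
  if 0 ≤ a ∧ a < (matrix.length : Int) then
    let row := PySem.List.pyGetD matrix a []
    if 0 ≤ b ∧ b < (row.length : Int) then PySem.List.pyGetD row b []
    else []
  else []

-- ===== PRECONDITION & SPEC =====
def Spec_getcordDP (matrix : List (List (List Int))) (a : Int) (b : Int) (out : List Int) : Prop := out = getcordDP_alt matrix a b
instance (matrix : List (List (List Int))) (a : Int) (b : Int) (out : List Int) : Decidable (Spec_getcordDP matrix a b out) := by unfold Spec_getcordDP; infer_instance

-- ===== CLAIM (what is proved, stated in full; the proofs are below) =====
def Claim_equal_getcordDP : Prop := ∀ (matrix : List (List (List Int))) (a : Int) (b : Int), Dom_getcordDP matrix a b → Spec_getcordDP matrix a b (getcordDP matrix a b)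

-- ===== LEMMAS AND PROOFS =====

-- i ≠ a: the inner loop never extends, empty point stays empty
theorem pvInnerA_ne_nil (row : List (List Int)) (i a b : Int) (h : i ≠ a) :
    ∀ js : List Int, pvInnerA row i a b js [] = [] := by
  intro js
  induction js with
  | nil => rfl
  | cons j rest ih =>
    simp only [pvInnerA]
    rw [if_neg (by rintro ⟨rfl, _⟩; exact h rfl), if_neg (by simp)]
    exact ih

-- i ≠ a, point nonempty: the inner loop breaks at once
theorem pvInnerA_ne_stay (row : List (List Int)) (i a b : Int) (h : i ≠ a)
    (js : List Int) (p : List Int) (hp : p ≠ []) : pvInnerA row i a b js p = p := by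
  cases js with
  | nil => rfl
  | cons j rest =>
    simp only [pvInnerA]
    rw [if_neg (by rintro ⟨rfl, _⟩; exact h rfl), if_pos hp]

-- i = a, empty point: the inner loop returns row[b] iff b occurs among the indices
theorem pvInnerA_eq (row : List (List Int)) (a b : Int) :
    ∀ js : List Int, pvInnerA row a a b js [] =
      if b ∈ js then PySem.List.pyGetD row b [] else [] := by
  intro js
  induction js with
  | nil => rfl
  | cons j rest ih =>
    simp only [pvInnerA]
    by_cases hj : j = b
    · subst hj; simp
    · rw [if_neg (by rintro ⟨_, rfl⟩; exact hj rfl), if_neg (by simp), ih]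
      simp [List.mem_cons, Ne.symm hj]

-- the outer loop is inert over indices different from a
theorem pvOuterA_skip (matrix : List (List (List Int))) (a b : Int) :
    ∀ (is : List Int) (p : List Int), (∀ i ∈ is, i ≠ a) → pvOuterA matrix a b is p = p := by
  intro is
  induction is with
  | nil => intro p _; rfl
  | cons i rest ih =>
    intro p h
    have hi : i ≠ a := h i (List.mem_cons_self ..)
    simp only [pvOuterA]
    have hstep : pvInnerA (PySem.List.pyGetD matrix i []) i a b
        (PySem.List.pyRange 0 (((PySem.List.pyGetD matrix i []).length : Int)) 1) p = p := by
      by_cases hp : p = []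
      · subst hp; exact pvInnerA_ne_nil _ _ _ _ hi _
      · exact pvInnerA_ne_stay _ _ _ _ hi _ _ hp
    rw [hstep]
    exact ih p (fun x hx => h x (List.mem_cons_of_mem _ hx))

theorem pvOuterA_append (matrix : List (List (List Int))) (a b : Int) :
    ∀ (is1 is2 : List Int) (p : List Int),
      pvOuterA matrix a b (is1 ++ is2) p = pvOuterA matrix a b is2 (pvOuterA matrix a b is1 p) := by
  intro is1
  induction is1 with
  | nil => intro is2 p; rfl
  | cons i rest ih => intro is2 p; simp only [List.cons_append, pvOuterA]; exact ih is2 _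

-- ===== VERDICT (by name: the statement is the Claim_ definition above) =====
theorem getcordDP_spec : Claim_equal_getcordDP := by
  intro matrix a b _
  unfold Spec_getcordDP getcordDP getcordDP_alt
  by_cases ha : 0 ≤ a ∧ a < (matrix.length : Int)
  · rw [if_pos ha]
    have hsplit : PySem.List.pyRange 0 (matrix.length : Int) 1 =
        PySem.List.pyRange 0 a 1 ++ (a :: PySem.List.pyRange (a+1) (matrix.length : Int) 1) := by
      rw [PySem.List.pyRange_one_append 0 a (matrix.length : Int) ha.1 (le_of_lt ha.2)]
      rw [PySem.List.pyRange_one_cons ha.2]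
    rw [hsplit, pvOuterA_append]
    rw [pvOuterA_skip matrix a b (PySem.List.pyRange 0 a 1) []
      (fun i hi => by have := (PySem.List.mem_pyRange_one).1 hi; omega)]
    simp only [pvOuterA]
    rw [pvInnerA_eq]
    by_cases hb : 0 ≤ b ∧ b < (((PySem.List.pyGetD matrix a []).length : Int))
    · rw [if_pos (PySem.List.mem_pyRange_one.2 ⟨hb.1, hb.2⟩), if_pos hb]
      exact pvOuterA_skip matrix a b _ _
        (fun i hi => by have := (PySem.List.mem_pyRange_one).1 hi; omega)
    · rw [if_neg (fun hmem => hb (by have := (PySem.List.mem_pyRange_one).1 hmem; omega)),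
        if_neg hb]
      exact pvOuterA_skip matrix a b _ _
        (fun i hi => by have := (PySem.List.mem_pyRange_one).1 hi; omega)
  · rw [if_neg ha]
    exact pvOuterA_skip matrix a b _ _
      (fun i hi => by have := (PySem.List.mem_pyRange_one).1 hi; omega)
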